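-- pv_equiv track=rewrite | github.com/rumhamryan/plex-o-tron | telegram_bot/config.py | _is_in_section
-- ===== SOURCE A (Python) =====
-- def _is_in_section(
--     section_header: str, current_line: str, all_lines: list[str]
-- ) -> bool:
--     """Helper to check if a line belongs to a given section."""
--     try:
--         index = all_lines.index(current_line)
--         for i in range(index, -1, -1):
--             line = all_lines[i].strip()
--             if line.startswith("[") and line.endswith("]"):
--                 return line == section_header
--         return False
--     except ValueError:
--         return False
-- ===== SOURCE B (Python) =====
-- def _is_in_section(
--     section_header: str, current_line: str, all_lines: list[str]
-- ) -> bool: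
--     """Single forward pass tracking the most recent section header."""
--     current_section = None
--     for line in all_lines:
--         stripped = line.strip()
--         if stripped.startswith("[") and stripped.endswith("]"):
--             current_section = stripped
--         if line == current_line:
--             return current_section == section_header
--     return False
-- ===== Notes on version B (the rewrite author's own statement) =====
-- stated objective: simpler
-- what changed: Replaces A's list.index plus backward scan from the match with a single forward pass that maintains the most recent section header seen so far.
import Mathlib
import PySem

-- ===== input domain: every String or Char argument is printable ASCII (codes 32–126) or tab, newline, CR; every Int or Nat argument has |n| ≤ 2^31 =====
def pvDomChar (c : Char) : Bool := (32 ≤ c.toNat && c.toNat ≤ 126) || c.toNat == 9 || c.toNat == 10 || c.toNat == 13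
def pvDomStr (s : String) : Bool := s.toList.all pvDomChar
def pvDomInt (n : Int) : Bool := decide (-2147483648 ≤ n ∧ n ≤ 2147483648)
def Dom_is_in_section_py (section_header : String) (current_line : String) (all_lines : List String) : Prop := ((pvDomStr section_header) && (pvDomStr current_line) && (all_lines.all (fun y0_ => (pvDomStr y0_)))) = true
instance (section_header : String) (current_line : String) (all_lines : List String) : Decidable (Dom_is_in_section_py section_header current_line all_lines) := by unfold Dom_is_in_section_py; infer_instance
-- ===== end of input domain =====

-- B replaces A's list.index + backward scan with a single stateful forward pass (objective: simpler).

-- ===== PORT A =====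
-- the `for i in range(index, -1, -1)` loop: i counts down from index to 0
def pvALoop (section_header : String) (all_lines : List String) : Nat → Bool
  | 0 =>
      let line := PySem.Str.strip (all_lines.getD 0 "")
      if PySem.Str.startswith line "[" && PySem.Str.endswith line "]" then line == section_header
      else false
  | n + 1 =>
      let line := PySem.Str.strip (all_lines.getD (n + 1) "")
      if PySem.Str.startswith line "[" && PySem.Str.endswith line "]" then line == section_header
      else pvALoop section_header all_lines n

def is_in_section_py (section_header : String) (current_line : String) (all_lines : List String) : Bool :=
  match PySem.List.index? all_lines current_line with
  | none => false          -- ValueError branch: return False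
  | some index => pvALoop section_header all_lines index

-- ===== PORT B =====
-- `current_section == section_header` with current_section possibly None
def pvCurCheck (section_header : String) : Option String → Bool
  | none => false
  | some h => h == section_header

-- forward pass; `cur` is the current_section state (None initially)
def pvBLoop (section_header : String) (current_line : String) : List String → Option String → Bool
  | [], _ => false
  | line :: rest, cur =>
    let stripped := PySem.Str.strip line
    let cur' := if PySem.Str.startswith stripped "[" && PySem.Str.endswith stripped "]" then
        some stripped else cur
    if line == current_line then pvCurCheck section_header cur'
    else pvBLoop section_header current_line rest cur'

def is_in_section_py_alt (section_header : String) (current_line : String) (all_lines : List String) : Bool :=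
  pvBLoop section_header current_line all_lines none

-- ===== PRECONDITION & SPEC =====
def Spec_is_in_section_py (section_header : String) (current_line : String) (all_lines : List String) (out : Bool) : Prop := out = is_in_section_py_alt section_header current_line all_lines
instance (section_header : String) (current_line : String) (all_lines : List String) (out : Bool) : Decidable (Spec_is_in_section_py section_header current_line all_lines out) := by unfold Spec_is_in_section_py; infer_instance

-- ===== CLAIM =====
def Claim_equal_is_in_section_py : Prop := ∀ (section_header : String) (current_line : String) (all_lines : List String), Dom_is_in_section_py section_header current_line all_lines → Spec_is_in_section_py section_header current_line all_lines (is_in_section_py section_header current_line all_lines)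

-- ===== LEMMAS AND PROOFS =====

-- generalisation of pvALoop with an explicit fallback used when the backward
-- scan runs off the front of the list without meeting a header
def pvAScan (section_header : String) (all_lines : List String) (cur : Option String) : Nat → Bool
  | 0 =>
      let line := PySem.Str.strip (all_lines.getD 0 "")
      if PySem.Str.startswith line "[" && PySem.Str.endswith line "]" then line == section_header
      else pvCurCheck section_header cur
  | n + 1 =>
      let line := PySem.Str.strip (all_lines.getD (n + 1) "")
      if PySem.Str.startswith line "[" && PySem.Str.endswith line "]" then line == section_header
      else pvAScan section_header all_lines cur n

theorem pvALoop_eq_scan (sh : String) (ls : List String) (i : Nat) :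
    pvALoop sh ls i = pvAScan sh ls none i := by
  induction i with
  | zero => simp [pvALoop, pvAScan, pvCurCheck]
  | succ n ih => simp only [pvALoop, pvAScan]; split_ifs <;> first | rfl | exact ih

theorem pvAScan_cons_gen (sh l : String) (ls : List String) (cur d : Option String)
    (hd : pvCurCheck sh d = pvAScan sh (l :: ls) cur 0) (i : Nat) :
    pvAScan sh (l :: ls) cur (i + 1) = pvAScan sh ls d i := by
  induction i with
  | zero =>
      simp only [pvAScan, List.getD_cons_succ, List.getD_cons_zero] at hd ⊢
      rw [← hd]
  | succ n ih =>
      simp only [pvAScan, List.getD_cons_succ] at ih ⊢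
      rw [ih]

theorem pvAScan_cons (sh l : String) (ls : List String) (cur : Option String) (i : Nat) :
    pvAScan sh (l :: ls) cur (i + 1) =
      pvAScan sh ls
        (if PySem.Str.startswith (PySem.Str.strip l) "[" && PySem.Str.endswith (PySem.Str.strip l) "]"
          then some (PySem.Str.strip l) else cur) i := by
  apply pvAScan_cons_gen
  simp only [pvAScan, List.getD_cons_zero]
  split_ifs with h <;> rfl

theorem pvBLoop_eq (sh cl : String) (ls : List String) :
    ∀ cur : Option String,
      pvBLoop sh cl ls cur =
        (match PySem.List.index? ls cl with
          | none => false
          | some i => pvAScan sh ls cur i) := by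
  induction ls with
  | nil =>
      intro cur
      rw [PySem.List.index?_eq_idxOf?]
      simp [pvBLoop, List.idxOf?]
  | cons l rest ih =>
      intro cur
      by_cases hcl : l = cl
      · subst hcl
        rw [PySem.List.index?_cons_self]
        simp only [pvBLoop, pvAScan, beq_self_eq_true, if_true, List.getD_cons_zero]
        split_ifs with h <;> rfl
      · rw [PySem.List.index?_cons_of_ne rest hcl]
        simp only [pvBLoop, beq_iff_eq, hcl, if_false]
        rw [ih]
        cases hidx : PySem.List.index? rest cl with
        | none => simp
        | some i => simp [pvAScan_cons]

-- ===== VERDICT =====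
theorem is_in_section_py_spec : Claim_equal_is_in_section_py := by
  intro sh cl ls _
  unfold Spec_is_in_section_py is_in_section_py is_in_section_py_alt
  rw [pvBLoop_eq]
  cases h : PySem.List.index? ls cl with
  | none => simp
  | some i => simp [pvALoop_eq_scan]
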